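-- pv_equiv track=rewrite | github.com/RonBeavis/SE | load_kernel.py | generate_vd
-- ===== SOURCE A (Python) =====
-- def generate_vd(_mods,_seq,_pre):
-- 	keep = False
-- 	v_pos = {}
-- 	ls = len(_seq)
-- 	v = ''
-- 	bNt = True
-- 	if _pre == 'G' and '[' in _mods:
-- 		if _mods['['][0] == 57021:
-- 			bNt = False
-- 	for v in _mods:
-- 		v_pos[v] = []
-- 		if _mods.get(v) == 0:
-- 			continue
-- 		if v == '[' and bNt:
-- 			v_pos[v] = [0]
-- 			keep = True
-- 		elif v == ']':
-- 			v_pos[v] = [ls-1]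
-- 			keep = True
-- 		if _seq.find(v) != -1:
-- 			v_pos[v] = [x for x, y in enumerate(_seq) if y == v]
-- 			keep = True
-- 	if not keep:
-- 		v_pos = {}
-- 	return v_pos
-- ===== SOURCE B (Python) =====
-- def generate_vd(_mods, _seq, _pre):
--     # one pass over the sequence builds a char -> positions index;
--     # the mods loop then only does O(1) lookups instead of rescanning _seq
--     index = {}
--     for x, y in enumerate(_seq):
--         index.setdefault(y, []).append(x)
--     bNt = True
--     if _pre == 'G' and '[' in _mods:
--         if _mods['['][0] == 57021:
--             bNt = False
--     ls = len(_seq)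
--     v_pos = {}
--     keep = False
--     for v in _mods:
--         if v in index:                 # single residue present in the sequence
--             v_pos[v] = index[v]
--             keep = True
--         elif v in _seq:                # substring hit without per-residue positions
--             v_pos[v] = []
--             keep = True
--         elif v == '[' and bNt:
--             v_pos[v] = [0]
--             keep = True
--         elif v == ']':
--             v_pos[v] = [ls - 1]
--             keep = True
--         else:
--             v_pos[v] = []
--     return v_pos if keep else {}
-- ===== Notes on version B (the rewrite author's own statement) =====
-- stated objective: faster
-- what changed: B builds a char->positions index in one pass over the sequence and the mods loop then only does dict lookups (plus one substring test for keys without per-char positions), instead of A's per-key str.find plus full enumerate comprehension over the sequence.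
import Mathlib
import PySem

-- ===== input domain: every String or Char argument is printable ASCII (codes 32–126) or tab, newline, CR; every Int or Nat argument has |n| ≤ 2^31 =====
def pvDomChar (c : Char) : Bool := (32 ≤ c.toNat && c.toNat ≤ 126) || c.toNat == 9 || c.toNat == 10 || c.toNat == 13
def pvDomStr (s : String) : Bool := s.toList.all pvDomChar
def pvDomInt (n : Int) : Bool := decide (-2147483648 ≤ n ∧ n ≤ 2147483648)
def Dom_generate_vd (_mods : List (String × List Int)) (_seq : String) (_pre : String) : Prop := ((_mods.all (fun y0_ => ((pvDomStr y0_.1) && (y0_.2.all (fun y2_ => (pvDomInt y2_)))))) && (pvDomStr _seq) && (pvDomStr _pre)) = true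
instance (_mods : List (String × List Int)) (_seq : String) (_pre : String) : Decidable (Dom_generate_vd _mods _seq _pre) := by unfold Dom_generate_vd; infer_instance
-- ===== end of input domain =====

-- B replaces A's per-key rescan of the sequence (str.find plus a full enumerate
-- comprehension for every modification key) by one position index built in a single pass.

-- ===== PORT A =====
-- the N-terminal flag, shared verbatim by both Pythons (same guard, same subscript)
def pvBNt (d : PySem.Dict String (List Int)) (_pre : String) : Bool :=
  if _pre == "G" && d.contains "[" then
    -- _mods['['][0]: pyGetD stands for the subscript; the IndexError input (empty list) is outside Pre_
    if PySem.List.pyGetD (d.getD "[" []) 0 0 == 57021 then false else true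
  else true

-- the body of A's `for v in _mods` loop, acting on the state (v_pos, keep)
def pvStepA (_seq : String) (bNt : Bool) (ls : Int)
    (st : PySem.Dict String (List Int) × Bool) (v : String) :
    PySem.Dict String (List Int) × Bool :=
  let vp := st.1.insert v []
  -- Python's `_mods.get(v) == 0` compares a list (or None) with the int 0: always False, the continue never fires
  let s2 : PySem.Dict String (List Int) × Bool :=
    if v == "[" && bNt then (vp.insert v [(0 : Int)], true)
    else if v == "]" then (vp.insert v [ls - 1], true)
    else (vp, st.2)
  if PySem.Str.find _seq v != -1 then
    (s2.1.insert v (((PySem.List.enumerate _seq.toList 0).filter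
        (fun p => String.ofList [p.2] == v)).map (·.1)), true)
  else s2

def generate_vd (_mods : List (String × List Int)) (_seq : String) (_pre : String) : List (String × List Int) :=
  let d := PySem.Dict.ofList _mods
  let st := d.keys.foldl (pvStepA _seq (pvBNt d _pre) (PySem.Str.len _seq)) (PySem.Dict.empty, false)
  if st.2 then st.1.items else []

-- ===== PORT B =====
-- index = {}; for x, y in enumerate(_seq): index.setdefault(y, []).append(x)
def pvIndex (_seq : String) : PySem.Dict String (List Int) :=
  (PySem.List.enumerate _seq.toList 0).foldl
    (fun d p => d.modify (String.ofList [p.2]) [] (· ++ [p.1])) PySem.Dict.empty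

-- the body of B's `for v in _mods` loop
def pvStepB (index : PySem.Dict String (List Int)) (_seq : String) (bNt : Bool) (ls : Int)
    (st : PySem.Dict String (List Int) × Bool) (v : String) :
    PySem.Dict String (List Int) × Bool :=
  if index.contains v then (st.1.insert v (index.getD v []), true)
  else if PySem.Str.isIn v _seq then (st.1.insert v [], true)
  else if v == "[" && bNt then (st.1.insert v [(0 : Int)], true)
  else if v == "]" then (st.1.insert v [ls - 1], true)
  else (st.1.insert v [], st.2)

def generate_vd_alt (_mods : List (String × List Int)) (_seq : String) (_pre : String) : List (String × List Int) :=
  let index := pvIndex _seq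
  let d := PySem.Dict.ofList _mods
  let st := d.keys.foldl (pvStepB index _seq (pvBNt d _pre) (PySem.Str.len _seq)) (PySem.Dict.empty, false)
  if st.2 then st.1.items else []

-- ===== PRECONDITION & SPEC =====
-- Pre_ excludes only the inputs where Python A raises IndexError (_pre == 'G' and _mods['['] is the empty list); B raises there too
def Pre_generate_vd (_mods : List (String × List Int)) (_seq : String) (_pre : String) : Prop :=
  ¬ (_pre = "G" ∧ (PySem.Dict.ofList _mods).get? "[" = some ([] : List Int))
instance (_mods : List (String × List Int)) (_seq : String) (_pre : String) : Decidable (Pre_generate_vd _mods _seq _pre) := by unfold Pre_generate_vd; infer_instance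
def pvWitness_generate_vd : (List (String × List Int)) × String × String := ([("A", [1]), ("[", [57021])], "CAT", "G")

def Spec_generate_vd (_mods : List (String × List Int)) (_seq : String) (_pre : String) (out : List (String × List Int)) : Prop := out = generate_vd_alt _mods _seq _pre
instance (_mods : List (String × List Int)) (_seq : String) (_pre : String) (out : List (String × List Int)) : Decidable (Spec_generate_vd _mods _seq _pre out) := by unfold Spec_generate_vd; infer_instance

-- ===== CLAIM (what is proved, stated in full; the proofs are below) =====
def Claim_equal_generate_vd : Prop := ∀ (_mods : List (String × List Int)) (_seq : String) (_pre : String), Dom_generate_vd _mods _seq _pre → Pre_generate_vd _mods _seq _pre → Spec_generate_vd _mods _seq _pre (generate_vd _mods _seq _pre)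

-- ===== LEMMAS AND PROOFS =====

-- A's comprehension [x for x, y in enumerate(_seq) if y == v]
def pvComp (cs : List Char) (v : String) : List Int :=
  ((PySem.List.enumerate cs 0).filter (fun p => String.ofList [p.2] == v)).map (·.1)

theorem pvIndex_getD (_seq : String) (v : String) :
    (pvIndex _seq).getD v [] = pvComp _seq.toList v := by
  unfold pvIndex pvComp
  rw [show ((PySem.List.enumerate _seq.toList 0).foldl
        (fun d p => d.modify (String.ofList [p.2]) [] (· ++ [p.1])) PySem.Dict.empty)
      = (((PySem.List.enumerate _seq.toList 0).map (fun p => (String.ofList [p.2], p.1))).foldl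
        (fun (d : PySem.Dict String (List Int)) q => d.modify q.1 [] (· ++ [q.2])) PySem.Dict.empty)
    from (List.foldl_map (f := fun (p : Int × Char) => (String.ofList [p.2], p.1))
      (g := fun (d : PySem.Dict String (List Int)) q => d.modify q.1 [] (· ++ [q.2]))
      (l := PySem.List.enumerate _seq.toList 0) (init := PySem.Dict.empty)).symm]
  rw [PySem.Dict.getD_foldl_modify_append]
  simp [List.filter_map, List.map_map, Function.comp_def]

theorem pvIndex_contains (_seq : String) (v : String) :
    (pvIndex _seq).contains v = true ↔ pvComp _seq.toList v ≠ [] := by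
  unfold pvIndex pvComp
  rw [PySem.Dict.contains_iff_mem_keys, PySem.Dict.keys_foldl_modify_key]
  simp [PySem.Set.mem_update, List.mem_map, List.filter_eq_nil_iff]

theorem pvComp_infix (cs : List Char) (v : String) (h : pvComp cs v ≠ []) :
    v.toList <:+: cs := by
  unfold pvComp at h
  rw [Ne, List.map_eq_nil_iff, List.filter_eq_nil_iff] at h
  push Not at h
  obtain ⟨p, hp, hbeq⟩ := h
  have hv : String.ofList [p.2] = v := by simpa using hbeq
  subst hv
  rw [String.toList_ofList, List.singleton_infix_iff]
  rw [PySem.List.mem_enumerate_iff] at hp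
  obtain ⟨k, hk, rfl⟩ := hp
  simp

theorem pvStep_eq (_seq : String) (bNt : Bool) (ls : Int) :
    pvStepA _seq bNt ls = pvStepB (pvIndex _seq) _seq bNt ls := by
  funext st v
  unfold pvStepA pvStepB
  by_cases hin : v.toList <:+: _seq.toList
  · -- v occurs in the sequence: A's find branch fires, B's first or second branch
    have hfind : (PySem.Str.find _seq v != -1) = true := by
      simp only [PySem.Str.find_eq, bne_iff_ne, ne_eq]
      exact (PySem.Chars.find_ne_neg_one_iff _ _).mpr hin
    rw [hfind]
    by_cases hc : pvComp _seq.toList v = []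
    · have hcon : (pvIndex _seq).contains v = false := by
        rw [← Bool.not_eq_true, pvIndex_contains]; simp [hc]
      have hisin : PySem.Str.isIn v _seq = true := by
        simp only [PySem.Str.isIn_eq]; exact (PySem.Chars.isIn_iff_infix _ _).mpr hin
      simp only [hcon, hisin, if_true, if_false, Bool.false_eq_true]
      show (_, true) = _
      rw [show ((PySem.List.enumerate _seq.toList 0).filter
        (fun p => String.ofList [p.2] == v)).map (·.1) = pvComp _seq.toList v from rfl, hc]
      split_ifs <;> simp [PySem.Dict.insert_insert_self]
    · have hcon : (pvIndex _seq).contains v = true := pvIndex_contains _seq v |>.mpr hc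
      simp only [hcon, if_true]
      rw [pvIndex_getD,
        show ((PySem.List.enumerate _seq.toList 0).filter
          (fun p => String.ofList [p.2] == v)).map (·.1) = pvComp _seq.toList v from rfl]
      split_ifs <;> simp [PySem.Dict.insert_insert_self]
  · -- v not in the sequence: A skips the find branch, B falls through to the defaults
    have hfind : (PySem.Str.find _seq v != -1) = false := by
      simp only [PySem.Str.find_eq, bne_eq_false_iff_eq]
      exact (PySem.Chars.find_eq_neg_one_iff _ _).mpr hin
    have hc : pvComp _seq.toList v = [] := by
      by_contra hc; exact hin (pvComp_infix _ _ hc)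
    have hcon : (pvIndex _seq).contains v = false := by
      rw [← Bool.not_eq_true, pvIndex_contains]; simp [hc]
    have hisin : PySem.Str.isIn v _seq = false := by
      simp only [PySem.Str.isIn_eq]; exact (PySem.Chars.isIn_eq_false_iff _ _).mpr hin
    rw [hfind]
    simp only [hcon, hisin, Bool.false_eq_true, if_false]
    split_ifs <;> simp [PySem.Dict.insert_insert_self]

-- ===== VERDICT (by name: the statement is the Claim_ definition above) =====
theorem generate_vd_spec : Claim_equal_generate_vd := by
  intro _mods _seq _pre _ _
  unfold Spec_generate_vd generate_vd generate_vd_alt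
  simp only [pvStep_eq]
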